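-- pv_equiv track=rewrite | github.com/Carlosdeandres10/duplimanager | server_py/routers/system.py | _log_counts
-- ===== SOURCE A (Python) =====
-- from typing import List, Optional, Dict, Any
--
-- def _log_counts(rows: List[Dict[str, Any]]) -> Dict[str, Dict[str, int]]:
--     levels = {"INFO": 0, "WARNING": 0, "ERROR": 0, "DEBUG": 0, "OTHER": 0}
--     types = {"backup": 0, "restore": 0, "storage": 0, "scheduler": 0, "duplicacy": 0}
--     for r in rows:
--         lvl = (r.get("level") or "OTHER").upper()
--         levels[lvl] = levels.get(lvl, 0) + 1
--         op = (r.get("opType") or "").lower()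
--         if op:
--             types[op] = types.get(op, 0) + 1
--     return {"levels": levels, "types": types}
-- ===== SOURCE B (Python) =====
-- def _key_order(base, keys):
--     order = list(base)
--     for k in keys:
--         if k not in order:
--             order.append(k)
--     return order
--
--
-- def _log_counts(rows):
--     lvls = [(r.get("level") or "OTHER").upper() for r in rows]
--     ops = [op for r in rows if (op := (r.get("opType") or "").lower())]
--     return {
--         "levels": {k: lvls.count(k) for k in _key_order(["INFO", "WARNING", "ERROR", "DEBUG", "OTHER"], lvls)},
--         "types": {k: ops.count(k) for k in _key_order(["backup", "restore", "storage", "scheduler", "duplicacy"], ops)},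
--     }
-- ===== Notes on version B (the rewrite author's own statement) =====
-- stated objective: alternative
-- what changed: Instead of A's single pass that increments two counter dicts row by row, B extracts the normalized level/op key lists, computes each output key order (template keys then unseen keys deduped in first-occurrence order), and builds each result by a per-key list.count scan — counting by key instead of by row.
import Mathlib
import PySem

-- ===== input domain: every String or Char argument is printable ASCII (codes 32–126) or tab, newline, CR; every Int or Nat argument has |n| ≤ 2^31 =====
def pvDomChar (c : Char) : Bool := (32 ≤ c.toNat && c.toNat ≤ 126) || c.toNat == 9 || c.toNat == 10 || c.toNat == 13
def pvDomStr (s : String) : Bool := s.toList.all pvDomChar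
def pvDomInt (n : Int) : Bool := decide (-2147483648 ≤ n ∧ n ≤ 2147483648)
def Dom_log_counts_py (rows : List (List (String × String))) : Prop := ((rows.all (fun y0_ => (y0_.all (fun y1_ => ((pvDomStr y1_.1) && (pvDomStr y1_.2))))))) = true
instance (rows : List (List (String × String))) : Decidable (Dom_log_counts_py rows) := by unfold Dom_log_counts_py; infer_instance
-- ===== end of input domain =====

-- B counts by key, not by row: it extracts the normalized key lists, computes the output key order, and fills each count by a per-key list.count scan (same result, O(k*n); a genuinely different algorithm, not faster).

-- ===== PORT A =====
-- r.get(k): first match in the row's association list (Python dict lookup)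
def pvRowGet (r : List (String × String)) (k : String) : Option String :=
  (r.find? (fun p => p.1 == k)).map (·.2)

-- Python's `x or dflt` for an Optional[str] x: None and "" are falsy
def pvOr (o : Option String) (dflt : String) : String :=
  match o with
  | some s => if s == "" then dflt else s
  | none => dflt

def pvLevels0 : PySem.Dict String Int :=
  PySem.Dict.ofList [("INFO", 0), ("WARNING", 0), ("ERROR", 0), ("DEBUG", 0), ("OTHER", 0)]

def pvTypes0 : PySem.Dict String Int :=
  PySem.Dict.ofList [("backup", 0), ("restore", 0), ("storage", 0), ("scheduler", 0), ("duplicacy", 0)]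

def pvStepA (st : PySem.Dict String Int × PySem.Dict String Int) (r : List (String × String)) :
    PySem.Dict String Int × PySem.Dict String Int :=
  let lvl := PySem.Str.upper (pvOr (pvRowGet r "level") "OTHER")
  let levels := st.1.insert lvl (st.1.getD lvl 0 + 1)
  let op := PySem.Str.lower (pvOr (pvRowGet r "opType") "")
  let types := if op == "" then st.2 else st.2.insert op (st.2.getD op 0 + 1)
  (levels, types)

def log_counts_py (rows : List (List (String × String))) : List (String × List (String × Int)) :=
  let st := rows.foldl pvStepA (pvLevels0, pvTypes0)
  [("levels", st.1.items), ("types", st.2.items)]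

-- ===== PORT B =====
-- _key_order: template keys, then unseen keys appended in first-occurrence order
def pvKeyOrder (base : List String) (keys : List String) : List String :=
  keys.foldl (fun seen k => if seen.contains k then seen else seen ++ [k]) base

-- the dict comprehension {k: keys.count(k) for k in order}: keys of `order` are distinct, so its association list is the map itself
def pvCountBy (order : List String) (keys : List String) : List (String × Int) :=
  order.map (fun k => (k, (keys.count k : Int)))

def pvLvlOf (r : List (String × String)) : String :=
  PySem.Str.upper (pvOr (pvRowGet r "level") "OTHER")

def pvOpOf? (r : List (String × String)) : Option String :=
  let op := PySem.Str.lower (pvOr (pvRowGet r "opType") "")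
  if op == "" then none else some op

def log_counts_py_alt (rows : List (List (String × String))) : List (String × List (String × Int)) :=
  let lvls := rows.map pvLvlOf
  let ops := rows.filterMap pvOpOf?
  [("levels", pvCountBy (pvKeyOrder ["INFO", "WARNING", "ERROR", "DEBUG", "OTHER"] lvls) lvls),
   ("types", pvCountBy (pvKeyOrder ["backup", "restore", "storage", "scheduler", "duplicacy"] ops) ops)]

-- ===== PRECONDITION & SPEC =====
def Spec_log_counts_py (rows : List (List (String × String))) (out : List (String × List (String × Int))) : Prop := out = log_counts_py_alt rows
instance (rows : List (List (String × String))) (out : List (String × List (String × Int))) : Decidable (Spec_log_counts_py rows out) := by unfold Spec_log_counts_py; infer_instance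

-- ===== CLAIM =====
def Claim_equal_log_counts_py : Prop := ∀ (rows : List (List (String × String))), Dom_log_counts_py rows → Spec_log_counts_py rows (log_counts_py rows)

-- ===== LEMMAS AND PROOFS =====
-- A's fused fold splits into two independent tally folds over the extracted key lists.
lemma foldA_split (rows : List (List (String × String))) (L T : PySem.Dict String Int) :
    rows.foldl pvStepA (L, T) =
      ((rows.map pvLvlOf).foldl (fun d k => d.insert k (d.getD k 0 + 1)) L,
       (rows.filterMap pvOpOf?).foldl (fun d k => d.insert k (d.getD k 0 + 1)) T) := by
  induction rows generalizing L T with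
  | nil => simp
  | cons r rs ih =>
    simp only [List.foldl_cons, List.map_cons, List.filterMap_cons]
    rw [ih]
    by_cases h : PySem.Str.lower (pvOr (pvRowGet r "opType") "") == ""
    · simp [pvStepA, pvLvlOf, pvOpOf?, h]
    · simp [pvStepA, pvLvlOf, pvOpOf?, h]

lemma keyOrder_eq_update (base keys : List String) :
    pvKeyOrder base keys = PySem.Set.update base keys := rfl

-- a tally fold's items are exactly B's per-key counts, for any all-zero template dict
lemma tally_items (keys : List String) (d : PySem.Dict String Int)
    (hnd : d.keys.Nodup) (h0 : ∀ k, d.getD k 0 = 0) :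
    (keys.foldl (fun d k => d.insert k (d.getD k 0 + 1)) d).items =
      pvCountBy (pvKeyOrder d.keys keys) keys := by
  rw [PySem.Dict.items_eq_map_keys _ (PySem.Dict.nodup_keys_foldl_insert keys _ d hnd) 0,
      PySem.Dict.keys_foldl_insert, keyOrder_eq_update, pvCountBy]
  refine List.map_congr_left fun k _ => ?_
  rw [PySem.Dict.getD_foldl_insert_add_one, h0]
  simp

lemma getD_zero_of_all_zero (d : PySem.Dict String Int)
    (h : ∀ p ∈ d.items, p.2 = 0) (k : String) : d.getD k 0 = 0 := by
  cases hf : d.items.find? (fun p => p.1 == k) with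
  | none => simp [PySem.Dict.getD, PySem.Dict.get?, hf]
  | some p =>
    have hm := List.mem_of_find?_eq_some hf
    simp [PySem.Dict.getD, PySem.Dict.get?, hf, h p hm]

lemma levels0_zero : ∀ k, pvLevels0.getD k 0 = 0 :=
  getD_zero_of_all_zero pvLevels0 (by decide)

lemma types0_zero : ∀ k, pvTypes0.getD k 0 = 0 :=
  getD_zero_of_all_zero pvTypes0 (by decide)

-- ===== VERDICT =====
theorem log_counts_py_spec : Claim_equal_log_counts_py := by
  intro rows _
  unfold Spec_log_counts_py log_counts_py log_counts_py_alt
  simp only [foldA_split]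
  rw [tally_items _ pvLevels0 (by decide) levels0_zero,
      tally_items _ pvTypes0 (by decide) types0_zero,
      (by decide : pvLevels0.keys = ["INFO", "WARNING", "ERROR", "DEBUG", "OTHER"]),
      (by decide : pvTypes0.keys = ["backup", "restore", "storage", "scheduler", "duplicacy"])]
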